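-- pv_equiv track=rewrite | github.com/lohith118/python | Level-4/s03/guvi-L4-s07-py03.py | noRepeatChar
-- ===== SOURCE A (Python) =====
-- def noRepeatChar(s) :
--     dic1 = {}
--     for c in s :
--         if c in dic1 :
--             dic1[c] += 1
--         else :
--             dic1[c] = 1
--     sum1 = 0
--     for x in dic1.values() :
--         if x > 1 :
--             return False
--     return True
-- ===== SOURCE B (Python) =====
-- def noRepeatChar(s):
--     t = list(s)
--     return len(set(t)) == len(t)
-- ===== Notes on version B (the rewrite author's own statement) =====
-- stated objective: simpler
-- what changed: Replaces the two-pass count-dictionary build and value scan with a single set-dedup cardinality comparison len(set(t)) == len(t), moving the work into C-level set construction.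
import Mathlib
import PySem

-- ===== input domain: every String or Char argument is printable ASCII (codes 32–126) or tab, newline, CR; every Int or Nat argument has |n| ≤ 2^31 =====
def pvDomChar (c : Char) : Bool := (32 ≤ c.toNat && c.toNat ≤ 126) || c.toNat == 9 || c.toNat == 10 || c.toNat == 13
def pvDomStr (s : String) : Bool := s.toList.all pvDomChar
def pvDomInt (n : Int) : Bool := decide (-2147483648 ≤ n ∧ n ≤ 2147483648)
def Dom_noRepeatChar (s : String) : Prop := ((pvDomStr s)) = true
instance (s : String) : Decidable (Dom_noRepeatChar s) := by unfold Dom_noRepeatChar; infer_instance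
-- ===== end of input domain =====

-- B replaces A's count-dictionary build and value scan with one set-dedup cardinality comparison (simpler).


-- ===== PORT A =====
-- the second loop of A: walk the dict's values, return False at the first value > 1
def noRepeatScanVals : List Int → Bool
  | [] => true
  | x :: rest => if x > 1 then false else noRepeatScanVals rest

def noRepeatChar (s : String) : Bool :=
  let dic1 := s.toList.foldl
    (fun d c => if d.contains c then d.modify c 0 (· + 1) else d.insert c (1 : Int))
    PySem.Dict.empty
  noRepeatScanVals dic1.values

-- ===== PORT B =====
def noRepeatChar_alt (s : String) : Bool :=
  let t := s.toList
  PySem.Set.len (PySem.Set.ofList t) == (t.length : Int)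

-- ===== PRECONDITION & SPEC =====
def Spec_noRepeatChar (s : String) (out : Bool) : Prop := out = noRepeatChar_alt s
instance (s : String) (out : Bool) : Decidable (Spec_noRepeatChar s out) := by unfold Spec_noRepeatChar; infer_instance

-- ===== CLAIM (what is proved, stated in full; the proofs are below) =====
def Claim_equal_noRepeatChar : Prop := ∀ (s : String), Dom_noRepeatChar s → Spec_noRepeatChar s (noRepeatChar s)

-- ===== LEMMAS AND PROOFS =====

-- A's loop body is exactly the Counter step
theorem noRepeat_step_eq (d : PySem.Dict Char Int) (c : Char) :
    (if d.contains c then d.modify c 0 (· + 1) else d.insert c (1 : Int)) = d.modify c 0 (· + 1) := by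
  by_cases h : d.contains c = true
  · simp [h]
  · simp only [Bool.not_eq_true] at h
    simp [PySem.Dict.insert, PySem.Dict.modify, h, PySem.Dict.getD_of_not_contains d 0 h]

theorem noRepeat_dict_eq (t : List Char) :
    t.foldl (fun d c => if d.contains c then d.modify c 0 (· + 1) else d.insert c (1 : Int))
      PySem.Dict.empty = PySem.Dict.counter t := by
  have hf : (fun (d : PySem.Dict Char Int) c =>
      if d.contains c then d.modify c 0 (· + 1) else d.insert c (1 : Int))
      = fun d c => d.modify c 0 (· + 1) :=
    funext fun d => funext fun c => noRepeat_step_eq d c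
  rw [hf, ← PySem.Dict.counter_eq_foldl]

theorem noRepeatScanVals_eq (l : List Int) : noRepeatScanVals l = !l.any (fun x => x > 1) := by
  induction l with
  | nil => rfl
  | cons x rest ih =>
    by_cases h : x > 1
    · simp [noRepeatScanVals, h]
    · simp [noRepeatScanVals, h, ih]

theorem noRepeat_A_iff (s : String) : noRepeatChar s = true ↔ s.toList.Nodup := by
  unfold noRepeatChar
  rw [noRepeat_dict_eq, noRepeatScanVals_eq]
  simp only [PySem.Dict.values, PySem.Dict.items_counter, List.map_map]
  rw [List.nodup_iff_count_le_one]
  simp only [Bool.not_eq_eq_eq_not, Bool.not_true, List.any_eq_false, List.mem_map,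
    Function.comp]
  constructor
  · intro h a
    by_cases ha : a ∈ s.toList
    · have := h ((s.toList.count a : Int)) ⟨a, by simp [PySem.Set.mem_ofList, ha], rfl⟩
      simp only [decide_eq_true_eq, not_lt] at this
      exact_mod_cast this
    · have := List.count_eq_zero_of_not_mem ha
      omega
  · rintro h x ⟨a, _, rfl⟩
    have := h a
    simp only [gt_iff_lt, decide_eq_true_eq, not_lt]
    exact_mod_cast this

theorem noRepeat_ofList_length_iff (t : List Char) :
    (PySem.Set.ofList t).length = t.length ↔ t.Nodup := by
  constructor
  · intro h
    induction t with
    | nil => simp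
    | cons x xs ih =>
      rw [PySem.Set.ofList_cons] at h
      by_cases hx : x ∈ xs
      · exfalso
        have h1 : (PySem.Set.discard (PySem.Set.ofList xs) x).length < (PySem.Set.ofList xs).length := by
          simp only [PySem.Set.discard]
          apply List.length_filter_lt_length_iff_exists.2
          exact ⟨x, by simp [PySem.Set.mem_ofList xs x, hx]⟩
        have h2 : (PySem.Set.ofList xs).length ≤ xs.length := PySem.Set.length_ofList_le xs
        simp at h; omega
      · have hd : PySem.Set.discard (PySem.Set.ofList xs) x = PySem.Set.ofList xs := by
          simp only [PySem.Set.discard]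
          apply List.filter_eq_self.2
          intro a ha
          have : a ∈ xs := (PySem.Set.mem_ofList xs a).1 ha
          simp; rintro rfl; exact hx this
        rw [hd] at h
        simp at h
        exact List.Nodup.cons hx (ih h)
  · intro h
    rw [PySem.Set.ofList_eq_self_of_nodup t h]

theorem noRepeat_B_iff (s : String) : noRepeatChar_alt s = true ↔ s.toList.Nodup := by
  unfold noRepeatChar_alt
  rw [← noRepeat_ofList_length_iff]
  simp [PySem.Set.len]

-- ===== VERDICT (by name: the statement is the Claim_ definition above) =====
theorem noRepeatChar_spec : Claim_equal_noRepeatChar := by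
  intro s _
  unfold Spec_noRepeatChar
  rw [Bool.eq_iff_iff, noRepeat_A_iff, noRepeat_B_iff]
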